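-- pv_equiv track=rewrite | github.com/algo4sik2/CoTe | Programmers/2022-01/06/taekyun.py | solution
-- ===== SOURCE A (Python) =====
-- def solution(n, arr1, arr2):
--     c = [' ', '#']
--     answer = []
--     for i,j in zip(arr1, arr2):
--         arr = ''
--         num = i | j
--         for _ in range(n):
--             arr = c[num % 2] + arr
--             num = num // 2
--         answer.append(arr)
--     return answer
-- ===== SOURCE B (Python) =====
-- def solution(n, arr1, arr2):
--     if n <= 0:
--         return ['' for _ in zip(arr1, arr2)]
--     tbl = str.maketrans('01', ' #')
--     size = 1 << n
--     return [format((i | j) % size, '0{}b'.format(n)).translate(tbl)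
--             for i, j in zip(arr1, arr2)]
-- ===== Notes on version B (the rewrite author's own statement) =====
-- stated objective: faster
-- what changed: Replaces the per-row manual base-2 accumulation loop (repeated %2, //2 and character prepend) by reducing the ORed value modulo 2^n and rendering the whole row at once with format(_, '0nb') plus a str.translate character table; no inner per-bit Python loop remains.
import Mathlib
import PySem

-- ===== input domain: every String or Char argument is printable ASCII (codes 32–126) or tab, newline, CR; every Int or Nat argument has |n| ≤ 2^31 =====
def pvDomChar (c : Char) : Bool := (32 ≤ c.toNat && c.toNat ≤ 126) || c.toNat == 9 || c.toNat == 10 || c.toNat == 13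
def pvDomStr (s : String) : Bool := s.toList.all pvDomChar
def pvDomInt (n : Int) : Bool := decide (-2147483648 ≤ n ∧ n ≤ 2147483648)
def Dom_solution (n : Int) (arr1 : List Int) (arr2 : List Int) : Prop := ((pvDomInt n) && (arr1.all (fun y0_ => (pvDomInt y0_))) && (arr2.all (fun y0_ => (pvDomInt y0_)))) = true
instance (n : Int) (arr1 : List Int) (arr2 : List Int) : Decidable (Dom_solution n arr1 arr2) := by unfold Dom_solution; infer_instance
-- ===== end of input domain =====

-- B renders each row by one modulo + zero-padded binary formatting + character translation
-- instead of A's per-bit divide-and-prepend loop (idiomatic; same asymptotic cost).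

-- ===== PORT A =====
-- inner loop body: arr = c[num % 2] + arr; num = num // 2   (num % 2 is always 0 or 1, so the
-- list index c[num % 2] never raises; .getD ' ' only unwraps the always-some option)
def solution (n : Int) (arr1 : List Int) (arr2 : List Int) : List String :=
  (arr1.zip arr2).foldl
    (fun answer p =>
      let st := (PySem.List.pyRange 0 n 1).foldl
        (fun (s : List Char × Int) _ =>
          (((PySem.List.pyGet? [' ', '#'] (PySem.Int.mod s.2 2)).getD ' ') :: s.1,
            PySem.Int.floordiv s.2 2))
        ([], Int.lor p.1 p.2)
      answer ++ [String.ofList st.1]) []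

-- ===== PORT B =====
-- format(m, '0{w}b'): binary digits of m (MSB first, via Nat.digits, LSB first, reversed),
-- zero-padded on the left to width w — exact for every Nat m
def pyFormatBin (w : Nat) (m : Nat) : List Char :=
  List.replicate (w - (Nat.digits 2 m).length) '0'
    ++ (Nat.digits 2 m).reverse.map (fun d => if d = 1 then '1' else '0')

-- str.maketrans('01', ' #') / str.translate
def pyTr (c : Char) : Char := if c = '0' then ' ' else if c = '1' then '#' else c

def solution_alt (n : Int) (arr1 : List Int) (arr2 : List Int) : List String :=
  if n ≤ 0 then (arr1.zip arr2).map (fun _ => "")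
  else
    (arr1.zip arr2).map (fun p =>
      String.ofList ((pyFormatBin n.toNat
        ((PySem.Int.mod (Int.lor p.1 p.2) (2 ^ n.toNat)).toNat)).map pyTr))

-- ===== PRECONDITION & SPEC =====
def Spec_solution (n : Int) (arr1 : List Int) (arr2 : List Int) (out : List String) : Prop := out = solution_alt n arr1 arr2
instance (n : Int) (arr1 : List Int) (arr2 : List Int) (out : List String) : Decidable (Spec_solution n arr1 arr2 out) := by unfold Spec_solution; infer_instance

-- ===== CLAIM (what is proved, stated in full; the proofs are below) =====
def Claim_equal_solution : Prop := ∀ (n : Int) (arr1 : List Int) (arr2 : List Int), Dom_solution n arr1 arr2 → Spec_solution n arr1 arr2 (solution n arr1 arr2)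

-- ===== LEMMAS AND PROOFS =====

-- proof-only helper: the MSB-first chars produced by k steps of A's inner loop
def msbChars : Nat → Int → List Char
  | 0, _ => []
  | k + 1, num =>
      msbChars k (PySem.Int.floordiv num 2)
        ++ [(PySem.List.pyGet? [' ', '#'] (PySem.Int.mod num 2)).getD ' ']

-- k steps of A's inner loop produce msbChars, MSB first, in front of the accumulator
theorem foldl_inner_eq_msbChars (l : List Int) (acc : List Char) (num : Int) :
    (l.foldl
      (fun (s : List Char × Int) _ =>
        (((PySem.List.pyGet? [' ', '#'] (PySem.Int.mod s.2 2)).getD ' ') :: s.1,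
          PySem.Int.floordiv s.2 2)) (acc, num)).1
      = msbChars l.length num ++ acc := by
  induction l generalizing acc num with
  | nil => simp [msbChars]
  | cons a l ih =>
      simp only [List.foldl_cons, List.length_cons, msbChars, ih, List.append_assoc,
        List.cons_append, List.nil_append]

theorem div2_emod (a : Int) (k : Nat) : a / 2 % 2 ^ k = a % 2 ^ (k + 1) / 2 := by
  have h := Int.emod_add_ediv_mul a (2 ^ (k + 1))
  set q := a / 2 ^ (k + 1) with hq
  set r := a % 2 ^ (k + 1) with hr
  have hr0 : 0 ≤ r := Int.emod_nonneg a (by positivity)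
  have hrlt : r < 2 ^ (k + 1) := Int.emod_lt_of_pos a (by positivity)
  have ha : a = r + 2 ^ k * q * 2 := by rw [← h]; ring
  rw [ha, Int.add_mul_ediv_right _ _ (by norm_num), Int.add_mul_emod_self_left]
  apply Int.emod_eq_of_lt <;> omega

theorem msbChars_congr (k : Nat) (a b : Int) (h : a % 2 ^ k = b % 2 ^ k) :
    msbChars k a = msbChars k b := by
  induction k generalizing a b with
  | zero => rfl
  | succ k ih =>
      have h2 : a % 2 = b % 2 := by
        have da : a % 2 = a % 2 ^ (k + 1) % 2 :=
          (Int.emod_emod_of_dvd a (by exact Dvd.intro_left (2 ^ k) (by ring))).symm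
        have db : b % 2 = b % 2 ^ (k + 1) % 2 :=
          (Int.emod_emod_of_dvd b (by exact Dvd.intro_left (2 ^ k) (by ring))).symm
        rw [da, db, h]
      have hdiv : a / 2 % 2 ^ k = b / 2 % 2 ^ k := by
        rw [div2_emod, div2_emod, h]
      simp only [msbChars]
      rw [PySem.Int.mod_eq_emod_of_pos (by norm_num),
          PySem.Int.mod_eq_emod_of_pos (by norm_num),
          PySem.Int.floordiv_eq_ediv_of_pos (by norm_num),
          PySem.Int.floordiv_eq_ediv_of_pos (by norm_num), h2, ih _ _ hdiv]

theorem msbChars_natCast (k : Nat) (m : Nat) (h : m < 2 ^ k) :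
    msbChars k (m : Int) = (pyFormatBin k m).map pyTr := by
  induction k generalizing m with
  | zero =>
      interval_cases m
      simp [msbChars, pyFormatBin]
  | succ k ih =>
      have hdiv : m / 2 < 2 ^ k := by omega
      have e1 : PySem.Int.floordiv (m : Int) 2 = ((m / 2 : Nat) : Int) := by
        exact_mod_cast PySem.Int.floordiv_natCast m 2
      have e2 : PySem.Int.mod (m : Int) 2 = ((m % 2 : Nat) : Int) := by
        exact_mod_cast PySem.Int.mod_natCast m 2
      have e3 : (PySem.List.pyGet? [' ', '#'] (((m % 2 : Nat) : Int))).getD ' '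
          = if m % 2 = 1 then '#' else ' ' := by
        rcases Nat.mod_two_eq_zero_or_one m with h2 | h2 <;>
          simp [h2]
      rw [msbChars, e1, e2, e3, ih _ hdiv]
      by_cases hm : m = 0
      · subst hm
        simp [pyFormatBin, pyTr, List.replicate_succ' (n := k)]
      · have hd : Nat.digits 2 m = m % 2 :: Nat.digits 2 (m / 2) :=
          Nat.digits_def' (by norm_num) (Nat.pos_of_ne_zero hm)
        simp only [pyFormatBin, hd, List.reverse_cons, List.map_append, List.map_cons,
          List.map_nil, List.length_cons, Nat.succ_sub_succ, List.append_assoc]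
        rcases Nat.mod_two_eq_zero_or_one m with h2 | h2 <;> simp [h2, pyTr]

theorem msbChars_bridge (k : Nat) (num : Int) :
    msbChars k num = (pyFormatBin k ((PySem.Int.mod num (2 ^ k)).toNat)).map pyTr := by
  have hpos : (0 : Int) < 2 ^ k := by positivity
  rw [PySem.Int.mod_eq_emod_of_pos hpos]
  set M := (num % 2 ^ k).toNat with hM
  have hMe : (M : Int) = num % 2 ^ k :=
    Int.toNat_of_nonneg (Int.emod_nonneg _ (by positivity))
  have hMlt : M < 2 ^ k := by
    have h1 := Int.emod_lt_of_pos num hpos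
    have h2 : ((2 ^ k : Nat) : Int) = 2 ^ k := by push_cast; ring
    omega
  rw [msbChars_congr k num M (by rw [hMe, Int.emod_emod_of_dvd _ dvd_rfl]),
      msbChars_natCast k M hMlt]

-- ===== VERDICT (by name: the statement is the Claim_ definition above) =====
theorem solution_spec : Claim_equal_solution := by
  unfold Claim_equal_solution
  intro n arr1 arr2 _
  unfold Spec_solution solution solution_alt
  rw [PySem.List.foldl_append_singleton_eq_map, List.nil_append]
  by_cases hn : n ≤ 0
  · rw [if_pos hn, PySem.List.pyRange_one_eq_nil (by omega)]
    simp
  · rw [if_neg hn]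
    refine List.map_congr_left (fun p _ => ?_)
    rw [foldl_inner_eq_msbChars, List.append_nil, PySem.List.length_pyRange_one,
        show ((n : Int) - 0) = n by ring, msbChars_bridge]
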